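-- pv_equiv track=rewrite | github.com/eliottcassidy2000/math | 04-computation/verify_n8_claims.py | find_odd_cycles
-- ===== SOURCE A (Python) =====
-- from itertools import combinations, permutations
--
-- def find_odd_cycles(T, n, max_len=None):
--     """Find all directed odd cycles of length 3, 5, 7, ..."""
--     if max_len is None:
--         max_len = n
--     cycles = []
--     for length in range(3, max_len + 1, 2):
--         for verts in combinations(range(n), length):
--             for perm in permutations(verts):
--                 if all(T[perm[i]][perm[(i+1) % length]] for i in range(length)):
--                     # Canonicalize: start with min vertex
--                     min_idx = perm.index(min(perm))
--                     canon = perm[min_idx:] + perm[:min_idx]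
--                     cycles.append(canon)
--                     break
--     # Deduplicate
--     return list(set(cycles))
-- ===== SOURCE B (Python) =====
-- from itertools import combinations
--
--
-- def _dfs(T, start, cur, path, rest):
--     """Extend the path (ending at cur) by the remaining vertices, trying them in
--     order; return the first full directed cycle found, else None."""
--     if not rest:
--         return path if T[cur][start] else None
--     for i in range(len(rest)):
--         v = rest[i]
--         if T[cur][v]:
--             r = _dfs(T, start, v, path + [v], rest[:i] + rest[i + 1:])
--             if r is not None:
--                 return r
--     return None
--
--
-- def find_odd_cycles(T, n, max_len=None):
--     """Find all directed odd cycles of length 3, 5, 7, ... (one canonical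
--     representative per vertex subset, via a pruned backtracking search)."""
--     if max_len is None:
--         max_len = n
--     cycles = []
--     for length in range(3, max_len + 1, 2):
--         for verts in combinations(range(n), length):
--             start = verts[0]
--             cyc = _dfs(T, start, start, [start], list(verts[1:]))
--             if cyc is not None:
--                 cycles.append(tuple(cyc))
--     return list(set(cycles))
-- ===== Notes on version B (the rewrite author's own statement) =====
-- stated objective: faster
-- what changed: A enumerates every permutation of each vertex subset and tests all edges of each; B runs a pruned backtracking DFS from the subset's minimum vertex, extending the path only along existing edges, which returns the identical lexicographically-first canonical cycle per subset.
-- outside the precondition, e.g. on find_odd_cycles([[0, 0, 0], [0, 0, 0], [0, 0]], 3, None): A returns [], B returns []; on find_odd_cycles([[0, 1, 0], [0, 0, 1], [1, 0, 0], []], 3, None): A returns [(0, 1, 2)], B returns [(0, 1, 2)]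
import Mathlib
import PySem

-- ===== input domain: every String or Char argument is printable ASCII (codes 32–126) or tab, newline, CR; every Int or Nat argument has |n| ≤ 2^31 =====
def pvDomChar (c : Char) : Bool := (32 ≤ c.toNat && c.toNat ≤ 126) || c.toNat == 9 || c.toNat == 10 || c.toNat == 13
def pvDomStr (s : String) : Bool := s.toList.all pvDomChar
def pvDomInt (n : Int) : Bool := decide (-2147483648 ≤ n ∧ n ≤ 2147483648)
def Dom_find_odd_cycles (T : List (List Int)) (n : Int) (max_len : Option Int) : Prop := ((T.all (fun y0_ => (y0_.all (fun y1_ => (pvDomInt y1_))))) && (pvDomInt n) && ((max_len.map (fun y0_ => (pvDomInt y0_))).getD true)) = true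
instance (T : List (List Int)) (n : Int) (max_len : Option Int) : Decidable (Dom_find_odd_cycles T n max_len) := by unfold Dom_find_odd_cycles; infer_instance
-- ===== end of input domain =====

-- B replaces A's exhaustive scan of all permutations of each vertex subset by a pruned
-- backtracking search that only extends paths along existing edges (objective: faster).

-- ===== PORT A =====
-- all(T[perm[i]][perm[(i+1) % length]] for i in range(length)); out-of-range indexing
-- (Python IndexError) is totalized with defaults and excluded by Pre_ below.
def pvCycleOKA (T : List (List Int)) (perm : List Int) (length : Int) : Bool :=
  (PySem.List.pyRange 0 length 1).all (fun i =>
    PySem.List.pyGetD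
      (PySem.List.pyGetD T (PySem.List.pyGetD perm i 0) [])
      (PySem.List.pyGetD perm (PySem.Int.mod (i + 1) length) 0) 0 != 0)

-- min_idx = perm.index(min(perm)); canon = perm[min_idx:] + perm[:min_idx]
-- (perm is nonempty wherever this is called, so min/.index are totalized with defaults)
def pvCanonA (perm : List Int) : List Int :=
  let min_idx : Nat := (PySem.List.index? perm (PySem.List.minD perm (fun x => x) 0)).getD 0
  PySem.List.slice perm (some (min_idx : Int)) none ++
    PySem.List.slice perm none (some (min_idx : Int))

def find_odd_cycles (T : List (List Int)) (n : Int) (max_len : Option Int) : List (List Int) :=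
  let ml := max_len.getD n
  let cycles : List (List Int) :=
    (PySem.List.pyRange 3 (ml + 1) 2).foldl (fun cycles length =>
      (PySem.List.combinations (PySem.List.pyRange 0 n 1) length.toNat).foldl (fun cycles verts =>
        -- 'for perm in permutations(verts): if ok: append(canon); break'
        match (PySem.List.permutations verts verts.length).find? (fun perm => pvCycleOKA T perm length) with
        | some perm => cycles ++ [pvCanonA perm]
        | none => cycles) cycles) []
  PySem.Set.ofList cycles  -- list(set(cycles)); compared as a set

-- ===== PORT B =====
-- truthiness of T[u][v] (totalized with defaults; in range under Pre_ below)
def pvEdgeB (T : List (List Int)) (u v : Int) : Bool :=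
  PySem.List.pyGetD (PySem.List.pyGetD T u []) v 0 != 0

-- _dfs: extend path (ending at cur) by the unused vertices in order; first full cycle wins
def pvDfsB (T : List (List Int)) (start cur : Int) (path rest : List Int) : Option (List Int) :=
  if rest.isEmpty then
    if pvEdgeB T cur start then some path else none
  else
    (List.range rest.length).attach.findSome? (fun i =>
      let v := rest.getD i.1 0
      if pvEdgeB T cur v then pvDfsB T start v (path ++ [v]) (rest.eraseIdx i.1) else none)
termination_by rest.length
decreasing_by
  have : i.1 < rest.length := List.mem_range.mp i.2
  simp [List.length_eraseIdx, this]
  omega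

def find_odd_cycles_alt (T : List (List Int)) (n : Int) (max_len : Option Int) : List (List Int) :=
  let ml := max_len.getD n
  let cycles : List (List Int) :=
    (PySem.List.pyRange 3 (ml + 1) 2).foldl (fun cycles length =>
      (PySem.List.combinations (PySem.List.pyRange 0 n 1) length.toNat).foldl (fun cycles verts =>
        match verts with  -- verts[0] / verts[1:]; verts is nonempty wherever this runs
        | [] => cycles
        | start :: rest =>
          match pvDfsB T start start [start] rest with
          | some cyc => cycles ++ [cyc]
          | none => cycles) cycles) []
  PySem.Set.ofList cycles

-- ===== PRECONDITION & SPEC =====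
-- Pre_ excludes the inputs where A's chained indexing T[v][w] raises IndexError.  It is
-- slightly narrower than A's exact return set: it asks every row of T to have length ≥ n,
-- while A can also return when only the rows/columns its short-circuiting happens to probe
-- are long enough.
def Pre_find_odd_cycles (T : List (List Int)) (n : Int) (max_len : Option Int) : Prop :=
  (max_len.getD n) < 3 ∨ n < 3 ∨
    (n ≤ PySem.List.len T ∧ ∀ row ∈ T, n ≤ PySem.List.len row)
instance (T : List (List Int)) (n : Int) (max_len : Option Int) : Decidable (Pre_find_odd_cycles T n max_len) := by unfold Pre_find_odd_cycles; infer_instance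

def pvWitness_find_odd_cycles : List (List Int) × Int × Option Int :=
  ([[0, 1, 0], [0, 0, 1], [1, 0, 0]], 3, none)

def Spec_find_odd_cycles (T : List (List Int)) (n : Int) (max_len : Option Int) (out : List (List Int)) : Prop := out = find_odd_cycles_alt T n max_len
instance (T : List (List Int)) (n : Int) (max_len : Option Int) (out : List (List Int)) : Decidable (Spec_find_odd_cycles T n max_len out) := by unfold Spec_find_odd_cycles; infer_instance

-- ===== CLAIM (what is proved, stated in full; the proofs are below) =====
def Claim_equal_find_odd_cycles : Prop := ∀ (T : List (List Int)) (n : Int) (max_len : Option Int), Dom_find_odd_cycles T n max_len → Pre_find_odd_cycles T n max_len → Spec_find_odd_cycles T n max_len (find_odd_cycles T n max_len)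

-- ===== LEMMAS AND PROOFS =====

-- the directed-path and directed-cycle tests, structurally
def pvPathOK (T : List (List Int)) (u : Int) : List Int → Bool
  | [] => true
  | v :: q => pvEdgeB T u v && pvPathOK T v q

def pvCbH (T : List (List Int)) (u : Int) (q : List Int) : Bool :=
  pvPathOK T u q && pvEdgeB T (q.getLastD u) u

-- glue lemmas about find?/findSome? used to reshape the two searches
theorem pv_find?_congr_mem {α : Type} (l : List α) (p q : α → Bool)
    (h : ∀ x ∈ l, p x = q x) : l.find? p = l.find? q := by
  induction l with
  | nil => rfl
  | cons x t ih =>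
    simp only [List.find?_cons, h x (by simp)]
    cases q x <;> simp [ih (fun y hy => h y (by simp [hy]))]

theorem pv_findSome?_congr_mem {α β : Type} (l : List α) (f g : α → Option β)
    (h : ∀ x ∈ l, f x = g x) : l.findSome? f = l.findSome? g := by
  induction l with
  | nil => rfl
  | cons x t ih =>
    simp only [List.findSome?_cons, h x (by simp)]
    cases g x <;> simp [ih (fun y hy => h y (by simp [hy]))]

theorem pv_findSome?_flatMap {α β γ : Type} (l : List α) (f : α → List β) (p : β → Option γ) :
    (l.flatMap f).findSome? p = l.findSome? (fun x => (f x).findSome? p) := by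
  induction l with
  | nil => rfl
  | cons x t ih =>
    simp only [List.flatMap_cons, List.findSome?_append, List.findSome?_cons, ih]
    cases (f x).findSome? p <;> simp

theorem pv_findSome?_guard {α β : Type} (l : List α) (p : α → Bool) (f : α → β) :
    l.findSome? (fun x => if p x then some (f x) else none) = (l.find? p).map f := by
  induction l with
  | nil => rfl
  | cons x t ih =>
    simp only [List.findSome?_cons, List.find?_cons]
    cases h : p x <;> simp [ih]

-- index-form cycle check (what pvCycleOKA reduces to) equals the structural one
theorem pv_pathOK_index (T : List (List Int)) :
    ∀ (q : List Int) (u : Int),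
      (List.range q.length).all
          (fun k => pvEdgeB T ((u :: q).getD k 0) ((u :: q).getD (k + 1) 0)) =
        pvPathOK T u q := by
  intro q
  induction q with
  | nil => intro u; rfl
  | cons v q' ih =>
    intro u
    simp only [List.length_cons, List.range_succ_eq_map, List.all_cons, List.all_map]
    simp only [Function.comp_def, Nat.succ_eq_add_one, List.getD_cons_succ, List.getD_cons_zero]
    rw [pvPathOK]
    congr 1
    exact ih v

theorem pv_getD_last : ∀ (q : List Int) (v : Int), (v :: q).getD q.length 0 = q.getLastD v := by
  intro q
  induction q with
  | nil => intro v; rfl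
  | cons w q' ih =>
    intro v
    rw [List.length_cons, List.getD_cons_succ, ih w, List.getLastD_cons]

theorem pv_all_congr_mem {α : Type} (l : List α) (p q : α → Bool)
    (h : ∀ x ∈ l, p x = q x) : l.all p = l.all q := by
  induction l with
  | nil => rfl
  | cons x t ih =>
    simp only [List.all_cons, h x (by simp)]
    rw [ih (fun y hy => h y (by simp [hy]))]

theorem pv_cycleOKA_eq (T : List (List Int)) (u : Int) (q : List Int) :
    pvCycleOKA T (u :: q) ((u :: q).length : Int) = pvCbH T u q := by
  unfold pvCycleOKA
  rw [PySem.List.pyRange_zero_nat, List.all_map]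
  have hstep : ∀ k ∈ List.range (u :: q).length,
      ((fun i => PySem.List.pyGetD
          (PySem.List.pyGetD T (PySem.List.pyGetD (u :: q) i 0) [])
          (PySem.List.pyGetD (u :: q) (PySem.Int.mod (i + 1) ((u :: q).length : Int)) 0) 0 != 0) ∘
        (fun k : Nat => (k : Int))) k =
      pvEdgeB T ((u :: q).getD k 0) ((u :: q).getD ((k + 1) % (u :: q).length) 0) := by
    intro k _
    have hc : ((k : Int) + 1) = ((k + 1 : Nat) : Int) := by push_cast; ring
    simp only [Function.comp_apply, hc, PySem.Int.mod_natCast, PySem.List.pyGetD_natCast,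
      pvEdgeB]
  rw [pv_all_congr_mem _ _ _ hstep]
  -- split off the wrap-around index
  rw [show (u :: q).length = q.length + 1 from rfl, List.range_succ, List.all_append]
  have hwrap : (q.length + 1) % (q.length + 1) = 0 := Nat.mod_self _
  have hlast : (u :: q).getD q.length 0 = q.getLastD u := pv_getD_last q u
  have hmain : ∀ k ∈ List.range q.length,
      pvEdgeB T ((u :: q).getD k 0) ((u :: q).getD ((k + 1) % (q.length + 1)) 0) =
      pvEdgeB T ((u :: q).getD k 0) ((u :: q).getD (k + 1) 0) := by
    intro k hk
    have : (k + 1) % (q.length + 1) = k + 1 :=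
      Nat.mod_eq_of_lt (by simpa using List.mem_range.mp hk)
    rw [this]
  rw [pv_all_congr_mem _ _ _ hmain, pv_pathOK_index]
  simp only [hwrap, hlast, List.getD_cons_zero, pvCbH, Bool.and_true, List.all_cons,
    List.all_nil]
-- one-step rotation of the cycle test, and its closure
theorem pv_pathOK_append (T : List (List Int)) :
    ∀ (q : List Int) (u w : Int),
      pvPathOK T u (q ++ [w]) = (pvPathOK T u q && pvEdgeB T (q.getLastD u) w) := by
  intro q
  induction q with
  | nil => intro u w; simp [pvPathOK]
  | cons v q' ih =>
    intro u w
    simp only [List.cons_append, pvPathOK, ih, List.getLastD_cons]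
    rw [Bool.and_assoc]

theorem pv_rot1 (T : List (List Int)) (u v : Int) (q : List Int) :
    pvCbH T u (v :: q) = pvCbH T v (q ++ [u]) := by
  simp only [pvCbH, pvPathOK, pv_pathOK_append, List.getLastD_cons, List.getLastD_concat]
  cases pvEdgeB T u v <;> cases pvPathOK T v q <;>
    cases pvEdgeB T (q.getLastD v) u <;> simp

theorem pv_rot (T : List (List Int)) :
    ∀ (a : List Int) (v0 : Int) (b : List Int) (x : Int) (xs : List Int),
      x :: xs = a ++ v0 :: b → pvCbH T x xs = true → pvCbH T v0 (b ++ a) = true := by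
  intro a
  induction a with
  | nil =>
    intro v0 b x xs h hC
    simp only [List.nil_append] at h
    cases h
    simpa using hC
  | cons y a' ih =>
    intro v0 b x xs h hC
    simp only [List.cons_append, List.cons.injEq] at h
    obtain ⟨rfl, rfl⟩ := h
    cases hxs : a' ++ v0 :: b with
    | nil => simp at hxs
    | cons z zs =>
      rw [hxs, pv_rot1] at hC
      have h2 : z :: (zs ++ [x]) = a' ++ v0 :: (b ++ [x]) := by
        rw [← List.cons_append, ← hxs, List.append_assoc]; simp
      have := ih v0 (b ++ [x]) z (zs ++ [x]) h2 hC
      simpa [List.append_assoc] using this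

-- completeness of PySem.List.permutations: every rearrangement is listed
theorem pv_mem_permutations_of_perm :
    ∀ (q xs : List Int), q.Perm xs → q ∈ PySem.List.permutations xs xs.length := by
  intro q
  induction q with
  | nil =>
    intro xs h
    have : xs = [] := (List.Perm.nil_eq h).symm
    subst this
    simp [PySem.List.permutations_zero]
  | cons y q'' ih =>
    intro xs h
    have hy : y ∈ xs := h.subset (by simp)
    have hlen : xs.length = q''.length + 1 := by simpa using h.length_eq.symm
    have hperm : q''.Perm (xs.erase y) := (List.cons_perm_iff_perm_erase.mp h).2
    have hidx : xs.idxOf y < xs.length := List.idxOf_lt_length_of_mem hy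
    have hget : xs[xs.idxOf y] = y := List.getElem_idxOf hidx
    have herase : xs.eraseIdx (xs.idxOf y) = xs.erase y := List.eraseIdx_idxOf_eq_erase y xs
    have hlen2 : (xs.erase y).length = q''.length := by
      have := hperm.length_eq; omega
    rw [hlen, PySem.List.permutations_succ]
    apply List.mem_flatMap.mpr
    refine ⟨xs.idxOf y, by simpa [← hlen] using List.mem_range.mpr hidx, ?_⟩
    rw [List.getElem?_eq_getElem hidx, hget]
    apply List.mem_map.mpr
    refine ⟨q'', ?_, rfl⟩
    have := ih (xs.erase y) hperm
    rw [hlen2] at this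
    rwa [herase]

-- the canonicalization is the identity on a min-first cycle
theorem pv_canonA_min_first (v0 : Int) (q : List Int) (h : ∀ x ∈ q, v0 < x) :
    pvCanonA (v0 :: q) = v0 :: q := by
  have hmin : PySem.List.minD (v0 :: q) (fun x => x) 0 = v0 := by
    unfold PySem.List.minD
    rw [PySem.List.min?_id_cons]
    have hle : List.foldl min v0 q ≤ v0 := (PySem.List.foldl_min_le q v0).1
    rcases PySem.List.foldl_min_mem q v0 with heq | hmem
    · simp [heq]
    · have := h _ hmem
      simp only [Option.getD_some]
      omega
  unfold pvCanonA
  rw [hmin, PySem.List.index?_cons_self]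
  simp only [Option.getD_some, Nat.cast_zero]
  rw [PySem.List.slice_from _ le_rfl, PySem.List.slice_to _ le_rfl]
  simp

-- the DFS finds the first completing arrangement of `rest`, in permutation order
theorem pv_findSome?_attach {α β : Type} (l : List α) (G : α → Option β) :
    l.attach.findSome? (fun x => G x.1) = l.findSome? G := by
  conv_rhs => rw [← List.attach_map_subtype_val l, List.findSome?_map]
  rfl

theorem pv_dfs_spec (T : List (List Int)) (start : Int) :
    ∀ (L : Nat) (rest : List Int), rest.length = L → ∀ (cur : Int) (path : List Int),
      pvDfsB T start cur path rest =
        (PySem.List.permutations rest rest.length).findSome?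
          (fun q => if pvPathOK T cur q && pvEdgeB T (q.getLastD cur) start then
              some (path ++ q) else none) := by
  intro L
  induction L using Nat.strong_induction_on with
  | _ L ih =>
    intro rest hL cur path
    cases rest with
    | nil =>
      rw [pvDfsB]
      simp [PySem.List.permutations_zero, pvPathOK, List.findSome?_cons]
      cases pvEdgeB T cur start <;> simp
    | cons r0 rs =>
      rw [pvDfsB]
      simp only [List.isEmpty_cons, Bool.false_eq_true, if_false]
      rw [pv_findSome?_attach (List.range (r0 :: rs).length)
        (fun i => if pvEdgeB T cur ((r0 :: rs).getD i 0) then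
          pvDfsB T start ((r0 :: rs).getD i 0) (path ++ [(r0 :: rs).getD i 0])
            ((r0 :: rs).eraseIdx i) else none)]
      rw [show (r0 :: rs).length = rs.length + 1 from rfl, PySem.List.permutations_succ,
        pv_findSome?_flatMap]
      apply pv_findSome?_congr_mem
      intro i hi
      have hilt : i < rs.length + 1 := by simpa using List.mem_range.mp hi
      have hget : (r0 :: rs)[i]? = some ((r0 :: rs)[i]) := List.getElem?_eq_getElem hilt
      have hgetD : (r0 :: rs).getD i 0 = (r0 :: rs)[i] := List.getD_eq_getElem _ _ hilt
      rw [hget, List.findSome?_map, hgetD]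
      set v := (r0 :: rs)[i] with hv
      cases hedge : pvEdgeB T cur v with
      | false =>
        simp only [Bool.false_eq_true, if_false]
        symm
        rw [List.findSome?_eq_none_iff]
        intro q' _
        simp [pvPathOK, hedge]
      | true =>
        have hL' : rs.length + 1 = L := by simpa using hL
        have helen : ((r0 :: rs).eraseIdx i).length = rs.length := by
          simp [List.length_eraseIdx, hilt]
        rw [if_pos rfl]
        rw [ih rs.length (by omega) _ helen v (path ++ [v])]
        rw [helen]
        apply pv_findSome?_congr_mem
        intro q' _
        simp only [Function.comp_apply, pvPathOK, List.getLastD_cons, hedge, Bool.true_and]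
        split
        · simp
        · rfl

-- the cycle test as a predicate on a whole (nonempty) candidate list
def pvCb (T : List (List Int)) : List Int → Bool
  | [] => true
  | u :: q => pvCbH T u q

-- per-subset agreement: first cycle over all permutations, canonicalized, = DFS result
theorem pv_subset_step (T : List (List Int)) (v0 : Int) (rest : List Int)
    (hs : (v0 :: rest).Pairwise (· < ·)) :
    ((PySem.List.permutations (v0 :: rest) (v0 :: rest).length).find? (pvCb T)).map pvCanonA =
      pvDfsB T v0 v0 [v0] rest := by
  have hlt : ∀ x ∈ rest, v0 < x := (List.pairwise_cons.mp hs).1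
  -- the DFS side: first completing arrangement of rest, prefixed by v0
  have hdfs : pvDfsB T v0 v0 [v0] rest =
      ((PySem.List.permutations rest rest.length).find? (fun q => pvCbH T v0 q)).map
        (fun q => v0 :: q) := by
    rw [pv_dfs_spec T v0 rest.length rest rfl v0 [v0], ← pv_findSome?_guard]
    rfl
  -- the A side: split the permutation list at the block starting with v0
  rw [show (v0 :: rest).length = rest.length + 1 from rfl, PySem.List.permutations_succ]
  rw [show (v0 :: rest).length = rest.length + 1 from rfl, List.range_succ_eq_map,
    List.flatMap_cons, List.find?_append]
  simp only [List.getElem?_cons_zero, List.eraseIdx_cons_zero]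
  rw [List.find?_map]
  have hpred : (pvCb T ∘ fun p => v0 :: p) = fun q => pvCbH T v0 q := by
    funext q; rfl
  rw [hpred]
  cases hfind : (PySem.List.permutations rest rest.length).find? (fun q => pvCbH T v0 q) with
  | some q0 =>
    have hq0 : q0 ∈ PySem.List.permutations rest rest.length := List.mem_of_find?_eq_some hfind
    have hcanon : pvCanonA (v0 :: q0) = v0 :: q0 :=
      pv_canonA_min_first v0 q0 (fun x hx =>
        hlt x (PySem.List.mem_of_mem_of_mem_permutations hq0 hx))
    rw [hdfs, hfind]
    simp [hcanon]
  | none =>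
    -- no cycle starts at v0, hence no permutation at all is a cycle
    rw [hdfs, hfind]
    simp only [Option.map_none, Option.none_or, Option.map_eq_none_iff]
    rw [List.find?_eq_none]
    intro p hp hCp
    -- p is some permutation of v0 :: rest that passes the cycle test
    have hpmem : p ∈ PySem.List.permutations (v0 :: rest) (v0 :: rest).length := by
      rw [show (v0 :: rest).length = rest.length + 1 from rfl, PySem.List.permutations_succ,
        show (v0 :: rest).length = rest.length + 1 from rfl, List.range_succ_eq_map,
        List.flatMap_cons]
      exact List.mem_append_right _ hp
    have hperm : p.Perm (v0 :: rest) := PySem.List.perm_of_mem_permutations hpmem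
    cases p with
    | nil => simpa using hperm.length_eq
    | cons x xs =>
      have hv0 : v0 ∈ x :: xs := (hperm.mem_iff).mpr (by simp)
      obtain ⟨a, t, hat⟩ := List.append_of_mem hv0
      have hrot : pvCbH T v0 (t ++ a) = true := pv_rot T a v0 t x xs hat hCp
      have hpr : (t ++ a).Perm rest := by
        have h1 : (v0 :: (a ++ t)).Perm (v0 :: rest) := by
          rw [hat] at hperm
          exact (List.perm_middle).symm.trans hperm
        exact (List.perm_append_comm).trans h1.cons_inv
      have hmem2 : (t ++ a) ∈ PySem.List.permutations rest rest.length :=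
        pv_mem_permutations_of_perm (t ++ a) rest hpr
      exact absurd hrot (by simpa using List.find?_eq_none.mp hfind _ hmem2)

-- ===== VERDICT (by name: the statement is the Claim_ definition above) =====
theorem find_odd_cycles_spec : Claim_equal_find_odd_cycles := by
  intro T n max_len _ _
  unfold Spec_find_odd_cycles find_odd_cycles find_odd_cycles_alt
  dsimp only
  congr 1
  apply PySem.List.foldl_congr_mem
  intro cycles length hlen
  have h3 : 3 ≤ length := ((PySem.List.mem_pyRange_iff_of_pos (by norm_num) length).mp hlen).1
  apply PySem.List.foldl_congr_mem
  intro acc verts hverts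
  obtain ⟨hsub, hlenv⟩ := (PySem.List.mem_combinations_iff _ _ _).mp hverts
  have hsorted : verts.Pairwise (· < ·) :=
    List.Pairwise.sublist hsub (PySem.List.pairwise_lt_pyRange_one 0 n)
  have hpos : 0 < verts.length := by rw [hlenv]; omega
  cases verts with
  | nil => simp at hpos
  | cons v0 rest =>
    have hcast : (((v0 :: rest).length : Nat) : Int) = length := by
      rw [hlenv]; omega
    have hpredA : (PySem.List.permutations (v0 :: rest) (v0 :: rest).length).find?
          (fun p => pvCycleOKA T p length) =
        (PySem.List.permutations (v0 :: rest) (v0 :: rest).length).find? (pvCb T) := by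
      apply pv_find?_congr_mem
      intro p hp
      have hplen : p.length = (v0 :: rest).length := PySem.List.length_of_mem_permutations hp
      cases p with
      | nil => simp at hplen
      | cons u q =>
        rw [show length = (((u :: q).length : Nat) : Int) from by rw [hplen, hcast]]
        rw [pv_cycleOKA_eq]
        rfl
    rw [hpredA]
    have hstep := pv_subset_step T v0 rest hsorted
    cases hfind : (PySem.List.permutations (v0 :: rest) (v0 :: rest).length).find? (pvCb T) with
    | some p =>
      rw [hfind] at hstep
      simp only [Option.map_some] at hstep
      show acc ++ [pvCanonA p] =
        match pvDfsB T v0 v0 [v0] rest with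
        | some cyc => acc ++ [cyc]
        | none => acc
      rw [← hstep]
    | none =>
      rw [hfind] at hstep
      simp only [Option.map_none] at hstep
      show acc =
        match pvDfsB T v0 v0 [v0] rest with
        | some cyc => acc ++ [cyc]
        | none => acc
      rw [← hstep]
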